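-- pv_equiv track=rewrite | github.com/chinmay-s-patil/SemPlanner | planner/utils/math_utils.py | assign_columns
-- ===== SOURCE A (Python) =====
-- def assign_columns(events):
--     """
--     Given a list of (start, end, data) tuples, return
--     [(data, col_index, num_cols)] with overlapping events spread across columns.
--     """
--     if not events:
--         return []
--     events = sorted(events, key=lambda x: x[0])
--     n = len(events)
--     col = [-1] * n
--
--     for i in range(n):
--         used = {col[j] for j in range(i) if events[j][1] > events[i][0]}
--         c = 0
--         while c in used:
--             c += 1
--         col[i] = c
--
--     parent = list(range(n))
--
--     def find(x):
--         while parent[x] != x: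
--             parent[x] = parent[parent[x]]
--             x = parent[x]
--         return x
--
--     def union(x, y):
--         parent[find(x)] = find(y)
--
--     for i in range(n):
--         for j in range(i + 1, n):
--             if events[i][0] < events[j][1] and events[j][0] < events[i][1]:
--                 union(i, j)
--
--     gm: dict = {}
--     for i in range(n):
--         g = find(i)
--         gm[g] = max(gm.get(g, 0), col[i])
--
--     return [(events[i][2], col[i], gm[find(i)] + 1) for i in range(n)]
-- ===== SOURCE B (Python) =====
-- def assign_columns(events):
--     """
--     Given a list of (start, end, data) tuples, return
--     [(data, col_index, num_cols)] with overlapping events spread across columns.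
--     """
--     if not events:
--         return []
--     evs = sorted(events, key=lambda x: x[0])
--     n = len(evs)
--
--     # First-fit via a per-column running-max end (no used-set / mex scan).
--     col = []
--     colend = []
--     for s, e, _ in evs:
--         for c in range(len(colend)):
--             if colend[c] <= s:
--                 col.append(c)
--                 if e > colend[c]:
--                     colend[c] = e
--                 break
--         else:
--             col.append(len(colend))
--             colend.append(e)
--
--     # Connected components by flat label relabelling (no union-find).
--     comp = list(range(n))
--     for i in range(n):
--         for j in range(i + 1, n):
--             if evs[i][0] < evs[j][1] and evs[j][0] < evs[i][1] and comp[i] != comp[j]: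
--                 li, lj = comp[i], comp[j]
--                 comp = [lj if x == li else x for x in comp]
--
--     # Widest column per component, in a flat array indexed by label.
--     best = [0] * n
--     for j in range(n):
--         if col[j] > best[comp[j]]:
--             best[comp[j]] = col[j]
--
--     return [(evs[i][2], col[i], best[comp[i]] + 1) for i in range(n)]
-- ===== Notes on version B (the rewrite author's own statement) =====
-- stated objective: simpler
-- what changed: B assigns columns by first-fit over a per-column running-max-end table instead of building a used-set and scanning for its mex, computes connected components by flat label relabelling instead of union-find with path compression, and collects per-component widths in a flat array indexed by label instead of a dict keyed by union-find roots.
import Mathlib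
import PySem

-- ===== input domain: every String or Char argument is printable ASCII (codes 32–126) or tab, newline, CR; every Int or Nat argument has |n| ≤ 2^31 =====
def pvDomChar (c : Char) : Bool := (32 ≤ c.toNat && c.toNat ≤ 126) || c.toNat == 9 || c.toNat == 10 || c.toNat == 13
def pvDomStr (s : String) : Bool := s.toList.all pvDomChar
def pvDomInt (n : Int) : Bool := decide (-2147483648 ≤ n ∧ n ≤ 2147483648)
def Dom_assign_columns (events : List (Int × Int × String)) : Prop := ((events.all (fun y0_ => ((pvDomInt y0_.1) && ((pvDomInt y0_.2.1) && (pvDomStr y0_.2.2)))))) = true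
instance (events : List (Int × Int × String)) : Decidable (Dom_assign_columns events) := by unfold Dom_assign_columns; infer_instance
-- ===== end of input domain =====

-- B replaces A's per-event used-set + mex scan by a per-column running-max-end table, A's
-- union-find with path compression by flat label relabelling, and A's dict of group maxima
-- by a flat array indexed by label (objective: simpler grouping machinery, same O(n^2) cost).

-- ===== PORT A =====
-- shared event accessors: events[j][0] / [1] / [2] (indices are always in range where used)
def pvStart (evs : List (Int × Int × String)) (j : Nat) : Int := (evs.getD j (0, 0, "")).1
def pvEnd (evs : List (Int × Int × String)) (j : Nat) : Int := (evs.getD j (0, 0, "")).2.1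
def pvData (evs : List (Int × Int × String)) (j : Nat) : String := (evs.getD j (0, 0, "")).2.2

-- used = {col[j] for j in range(i) if events[j][1] > events[i][0]}
def pvUsedA (evs : List (Int × Int × String)) (col : List Int) (i : Nat) : PySem.Set Int :=
  (List.range i).foldl
    (fun acc j => if pvEnd evs j > pvStart evs i then PySem.Set.add acc (col.getD j 0) else acc)
    PySem.Set.empty

-- c = 0; while c in used: c += 1   (fuel |used|+1 is exact: the loop body runs at most |used| times)
def pvMexA (used : PySem.Set Int) : Nat → Int → Int
  | 0, c => c
  | fuel + 1, c => if PySem.Set.contains used c then pvMexA used fuel (c + 1) else c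

-- col[i] = c for i = 0..n-1 (col is written once per index, in order: built here by appending)
def pvColsA (evs : List (Int × Int × String)) : List Int :=
  (List.range evs.length).foldl
    (fun col i =>
      let used := pvUsedA evs col i
      col ++ [pvMexA used (used.length + 1) 0])
    []

def pvPar (p : List Nat) (x : Nat) : Nat := p.getD x 0

-- while parent[x] != x: parent[x] = parent[parent[x]]; x = parent[x]
-- (fuel = len(parent) is exact: parent chains are strictly height-decreasing, proved below)
def pvFindA : Nat → List Nat → Nat → List Nat × Nat
  | 0, p, x => (p, x)
  | fuel + 1, p, x =>
    if pvPar p x = x then (p, x)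
    else pvFindA fuel (p.set x (pvPar p (pvPar p x))) (pvPar p (pvPar p x))

-- parent[find(x)] = find(y): Python evaluates the right-hand side find(y) first
def pvUnionA (p : List Nat) (x y : Nat) : List Nat :=
  let ry := pvFindA p.length p y
  let rx := pvFindA ry.1.length ry.1 x
  rx.1.set rx.2 ry.2

def pvUnionLoopA (evs : List (Int × Int × String)) : List Nat :=
  (List.range evs.length).foldl
    (fun p i =>
      (List.range' (i + 1) (evs.length - (i + 1))).foldl
        (fun p j =>
          if pvStart evs i < pvEnd evs j ∧ pvStart evs j < pvEnd evs i then pvUnionA p i j else p)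
        p)
    (List.range evs.length)

-- gm[g] = max(gm.get(g, 0), col[i]) with g = find(i)
def pvGmLoopA (evs : List (Int × Int × String)) (col : List Int) (p : List Nat) :
    List Nat × PySem.Dict Nat Int :=
  (List.range evs.length).foldl
    (fun st i =>
      let f := pvFindA st.1.length st.1 i
      (f.1, st.2.insert f.2 (max (st.2.getD f.2 0) (col.getD i 0))))
    (p, PySem.Dict.empty)

-- [(events[i][2], col[i], gm[find(i)] + 1) for i in range(n)]
-- (gm[g]: the key g = find(i) was inserted by pvGmLoopA, so getD's default is never read)
def pvOutLoopA (evs : List (Int × Int × String)) (col : List Int) (gm : PySem.Dict Nat Int)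
    (p : List Nat) : List Nat × List (String × Int × Int) :=
  (List.range evs.length).foldl
    (fun st i =>
      let f := pvFindA st.1.length st.1 i
      (f.1, st.2 ++ [(pvData evs i, col.getD i 0, gm.getD f.2 0 + 1)]))
    (p, [])

def assign_columns (events : List (Int × Int × String)) : List (String × Int × Int) :=
  if events = [] then []
  else
    let evs := PySem.List.sorted events (fun x => x.1) false
    let col := pvColsA evs
    let p := pvUnionLoopA evs
    let gm := pvGmLoopA evs col p
    (pvOutLoopA evs col gm.2 gm.1).2

-- ===== PORT B =====
-- for c in range(len(colend)): if colend[c] <= s: break   → index of the first free column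
def pvFirstFreeB (colend : List Int) (s : Int) : Option Nat :=
  match colend with
  | [] => none
  | e :: rest => if e ≤ s then some 0 else (pvFirstFreeB rest s).map (· + 1)

def pvColStepB (st : List Int × List Int) (ev : Int × Int × String) : List Int × List Int :=
  match pvFirstFreeB st.2 ev.1 with
  | some c =>
    (st.1 ++ [(c : Int)],
     if ev.2.1 > st.2.getD c 0 then st.2.set c ev.2.1 else st.2)
  | none => (st.1 ++ [(st.2.length : Int)], st.2 ++ [ev.2.1])

def pvColsB (evs : List (Int × Int × String)) : List Int × List Int :=
  evs.foldl pvColStepB ([], [])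

-- comp = [lj if x == li else x for x in comp]
def pvRelabelB (comp : List Nat) (li lj : Nat) : List Nat :=
  comp.map fun x => if x = li then lj else x

def pvCompLoopB (evs : List (Int × Int × String)) : List Nat :=
  (List.range evs.length).foldl
    (fun comp i =>
      (List.range' (i + 1) (evs.length - (i + 1))).foldl
        (fun comp j =>
          if pvStart evs i < pvEnd evs j ∧ pvStart evs j < pvEnd evs i ∧
              comp.getD i 0 ≠ comp.getD j 0 then
            pvRelabelB comp (comp.getD i 0) (comp.getD j 0)
          else comp)
        comp)
    (List.range evs.length)

-- best[comp[j]] = max(best[comp[j]], col[j]) over a flat array of size n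
def pvBestLoopB (n : Nat) (comp : List Nat) (col : List Int) : List Int :=
  (List.range n).foldl
    (fun best j =>
      if col.getD j 0 > best.getD (comp.getD j 0) 0 then
        best.set (comp.getD j 0) (col.getD j 0)
      else best)
    (List.replicate n 0)

def assign_columns_alt (events : List (Int × Int × String)) : List (String × Int × Int) :=
  if events = [] then []
  else
    let evs := PySem.List.sorted events (fun x => x.1) false
    let col := (pvColsB evs).1
    let comp := pvCompLoopB evs
    let best := pvBestLoopB evs.length comp col
    (List.range evs.length).map
      (fun i => (pvData evs i, col.getD i 0, best.getD (comp.getD i 0) 0 + 1))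

-- ===== PRECONDITION & SPEC =====
def Spec_assign_columns (events : List (Int × Int × String)) (out : List (String × Int × Int)) : Prop := out = assign_columns_alt events
instance (events : List (Int × Int × String)) (out : List (String × Int × Int)) : Decidable (Spec_assign_columns events out) := by unfold Spec_assign_columns; infer_instance

-- ===== CLAIM (what is proved, stated in full; the proofs are below) =====
def Claim_equal_assign_columns : Prop := ∀ (events : List (Int × Int × String)), Dom_assign_columns events → Spec_assign_columns events (assign_columns events)

-- ===== LEMMAS AND PROOFS =====

-- ---------- generic list-access helpers ----------
lemma pvGetD_set_eq {p : List Nat} {i : Nat} (v : Nat) (h : i < p.length) :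
    (p.set i v).getD i 0 = v := by
  simp [List.getD_eq_getElem?_getD, List.getElem?_set, h]

lemma pvGetD_set_ne {p : List Nat} {i j : Nat} (v : Nat) (h : j ≠ i) :
    (p.set i v).getD j 0 = p.getD j 0 := by
  simp [List.getD_eq_getElem?_getD, List.getElem?_set, (Ne.symm h : i ≠ j)]

lemma pvSet_getD_self {p : List Nat} {i : Nat} (h : i < p.length) :
    p.set i (p.getD i 0) = p := by
  apply List.ext_getElem?
  intro k
  rw [List.getElem?_set]
  split
  · next heq =>
    subst heq
    simp [List.getD_eq_getElem?_getD, h, List.getElem?_eq_getElem h]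
  · rfl

-- ---------- parent-array root machinery for A's union-find ----------
def pvBnd (p : List Nat) : Prop := ∀ x, x < p.length → pvPar p x < p.length
def pvAcy (p : List Nat) (h : Nat → Nat) : Prop :=
  ∀ x, x < p.length → pvPar p x ≠ x → h (pvPar p x) < h x
def pvRoot (p : List Nat) (x : Nat) : Nat := (pvPar p)^[p.length] x

lemma pvPar_set {p : List Nat} {x : Nat} (v : Nat) (hx : x < p.length) (y : Nat) :
    pvPar (p.set x v) y = if y = x then v else pvPar p y := by
  by_cases h : y = x
  · subst h; simp only [pvPar, if_pos rfl]; exact pvGetD_set_eq v hx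
  · simp only [pvPar, if_neg h]; exact pvGetD_set_ne v h

lemma pvIter_lt {p : List Nat} (hb : pvBnd p) {x : Nat} (hx : x < p.length) (k : Nat) :
    (pvPar p)^[k] x < p.length := by
  induction k generalizing x with
  | zero => simpa using hx
  | succ k ih => rw [Function.iterate_succ_apply]; exact ih (hb x hx)

lemma pvIter_fix {p : List Nat} {y : Nat} (hy : pvPar p y = y) (k : Nat) :
    (pvPar p)^[k] y = y := by
  induction k with
  | zero => rfl
  | succ k ih => rw [Function.iterate_succ_apply, hy, ih]

lemma pvIter_h_le {p : List Nat} {h : Nat → Nat} (hb : pvBnd p) (ha : pvAcy p h) {x : Nat}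
    (hx : x < p.length) (k : Nat) : h ((pvPar p)^[k] x) ≤ h x := by
  induction k generalizing x with
  | zero => simp
  | succ k ih =>
    rw [Function.iterate_succ_apply]
    by_cases hfix : pvPar p x = x
    · rw [hfix]; exact ih hx
    · exact le_trans (ih (hb x hx)) (le_of_lt (ha x hx hfix))

lemma pvRoot_fix {p : List Nat} {h : Nat → Nat} (hb : pvBnd p) (ha : pvAcy p h) {x : Nat}
    (hx : x < p.length) : pvPar p (pvRoot p x) = pvRoot p x := by
  by_cases hex : ∃ k, k < p.length ∧ pvPar p ((pvPar p)^[k] x) = (pvPar p)^[k] x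
  · obtain ⟨k, hk, hfix⟩ := hex
    have hsplit : pvRoot p x = (pvPar p)^[k] x := by
      have hkn : p.length = (p.length - k) + k := by omega
      rw [pvRoot, hkn, Function.iterate_add_apply]
      exact pvIter_fix hfix _
    rw [hsplit]; exact hfix
  · push_neg at hex
    exfalso
    have hdec : ∀ k, k < p.length → h ((pvPar p)^[k+1] x) < h ((pvPar p)^[k] x) := by
      intro k hk
      have hnf := hex k hk
      rw [Function.iterate_succ_apply']
      exact ha _ (pvIter_lt hb hx k) hnf
    have hmono : ∀ j i, i < j → j ≤ p.length → h ((pvPar p)^[j] x) < h ((pvPar p)^[i] x) := by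
      intro j
      induction j with
      | zero => intro i hi _; omega
      | succ j ih =>
        intro i hij hj
        have hj' : j < p.length := by omega
        rcases Nat.lt_or_ge i j with hlt | hge
        · exact lt_trans (hdec j hj') (ih i hlt (by omega))
        · have heq : i = j := by omega
          rw [heq]; exact hdec j hj'
    have hinj : Function.Injective
        (fun k : Fin (p.length + 1) => (⟨(pvPar p)^[k.val] x, pvIter_lt hb hx k.val⟩ : Fin p.length)) := by
      intro a b hab
      simp only [Fin.mk.injEq] at hab
      rcases lt_trichotomy a.val b.val with hlt | heq | hgt
      · have := hmono b a hlt (Nat.le_of_lt_succ b.isLt); rw [hab] at this; omega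
      · exact Fin.ext heq
      · have := hmono a b hgt (Nat.le_of_lt_succ a.isLt); rw [hab] at this; omega
    have := Fintype.card_le_of_injective _ hinj
    simp only [Fintype.card_fin] at this
    omega

lemma pvRoot_of_fix {p : List Nat} {x : Nat} (hfix : pvPar p x = x) : pvRoot p x = x :=
  pvIter_fix hfix _

lemma pvRoot_lt {p : List Nat} (hb : pvBnd p) {x : Nat} (hx : x < p.length) :
    pvRoot p x < p.length :=
  pvIter_lt hb hx _

lemma pvRoot_step {p : List Nat} {h : Nat → Nat} (hb : pvBnd p) (ha : pvAcy p h) {x : Nat}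
    (hx : x < p.length) : pvRoot p (pvPar p x) = pvRoot p x := by
  have h1 : (pvPar p)^[p.length] (pvPar p x) = pvPar p ((pvPar p)^[p.length] x) := by
    rw [← Function.iterate_succ_apply, Function.iterate_succ_apply']
  rw [pvRoot, h1]
  exact pvRoot_fix hb ha hx

lemma pvGrand_h_lt {p : List Nat} {h : Nat → Nat} (hb : pvBnd p) (ha : pvAcy p h) {x : Nat}
    (hx : x < p.length) (hnf : pvPar p x ≠ x) : h (pvPar p (pvPar p x)) < h x := by
  by_cases h2 : pvPar p (pvPar p x) = pvPar p x
  · rw [h2]; exact ha x hx hnf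
  · exact lt_trans (ha (pvPar p x) (hb x hx) h2) (ha x hx hnf)

lemma pvCompress {p : List Nat} {h : Nat → Nat} {x : Nat} (hb : pvBnd p) (ha : pvAcy p h)
    (hx : x < p.length) (hnf : pvPar p x ≠ x) :
    pvBnd (p.set x (pvPar p (pvPar p x))) ∧ pvAcy (p.set x (pvPar p (pvPar p x))) h ∧
    (∀ z, z < p.length → pvRoot (p.set x (pvPar p (pvPar p x))) z = pvRoot p z) := by
  have hgx : h (pvPar p (pvPar p x)) < h x := pvGrand_h_lt hb ha hx hnf
  have hglt : pvPar p (pvPar p x) < p.length := hb _ (hb _ hx)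
  have hlen : (p.set x (pvPar p (pvPar p x))).length = p.length := by simp
  have hb' : pvBnd (p.set x (pvPar p (pvPar p x))) := by
    intro y hy
    rw [hlen] at hy ⊢
    rw [pvPar_set _ hx]
    by_cases hyx : y = x
    · simp [hyx, hglt]
    · simp [hyx]; exact hb y hy
  have ha' : pvAcy (p.set x (pvPar p (pvPar p x))) h := by
    intro y hy hne
    rw [hlen] at hy
    rw [pvPar_set _ hx] at hne ⊢
    by_cases hyx : y = x
    · subst hyx; simpa using hgx
    · simp only [if_neg hyx] at hne ⊢; exact ha y hy hne
  refine ⟨hb', ha', ?_⟩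
  have main : ∀ m z, h z ≤ m → z < p.length → pvRoot (p.set x (pvPar p (pvPar p x))) z = pvRoot p z := by
    intro m
    induction m with
    | zero =>
      intro z hzm hz
      by_cases hzx : z = x
      · exfalso; rw [hzx] at hzm; omega
      · by_cases hfz : pvPar p z = z
        · have hfz' : pvPar (p.set x (pvPar p (pvPar p x))) z = z := by
            rw [pvPar_set _ hx, if_neg hzx]; exact hfz
          rw [pvRoot_of_fix hfz', pvRoot_of_fix hfz]
        · exfalso; have := ha z hz hfz; omega
    | succ m ih =>
      intro z hzm hz
      by_cases hzx : z = x
      · rw [hzx]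
        have hstep : pvRoot (p.set x (pvPar p (pvPar p x))) x
            = pvRoot (p.set x (pvPar p (pvPar p x))) (pvPar (p.set x (pvPar p (pvPar p x))) x) := by
          exact (pvRoot_step hb' ha' (by rw [hlen]; exact hx)).symm
        have hgm : h (pvPar p (pvPar p x)) ≤ m := by rw [hzx] at hzm; omega
        rw [hstep, pvPar_set _ hx, if_pos rfl]
        rw [ih _ hgm hglt]
        rw [pvRoot_step hb ha (hb x hx), pvRoot_step hb ha hx]
      · by_cases hfz : pvPar p z = z
        · have hfz' : pvPar (p.set x (pvPar p (pvPar p x))) z = z := by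
            rw [pvPar_set _ hx, if_neg hzx]; exact hfz
          rw [pvRoot_of_fix hfz', pvRoot_of_fix hfz]
        · have hstep : pvRoot (p.set x (pvPar p (pvPar p x))) z
              = pvRoot (p.set x (pvPar p (pvPar p x))) (pvPar p z) := by
            have := (pvRoot_step hb' ha' (x := z) (by rw [hlen]; exact hz)).symm
            rw [pvPar_set _ hx, if_neg hzx] at this
            exact this
          have hPz : h (pvPar p z) ≤ m := by have := ha z hz hfz; omega
          rw [hstep, ih _ hPz (hb z hz), pvRoot_step hb ha hz]
  exact fun z hz => main (h z) z le_rfl hz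

lemma pvFind_spec : ∀ (fuel : Nat) (p : List Nat) (h : Nat → Nat) (x : Nat),
    pvBnd p → pvAcy p h → x < p.length →
    pvPar p ((pvPar p)^[fuel] x) = (pvPar p)^[fuel] x →
    (pvFindA fuel p x).2 = pvRoot p x ∧
    (pvFindA fuel p x).1.length = p.length ∧
    pvBnd (pvFindA fuel p x).1 ∧ pvAcy (pvFindA fuel p x).1 h ∧
    (∀ z, z < p.length → pvRoot (pvFindA fuel p x).1 z = pvRoot p z) := by
  intro fuel
  induction fuel with
  | zero =>
    intro p h x hb ha hx hfix
    have hred : pvFindA 0 p x = (p, x) := rfl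
    rw [hred]
    exact ⟨(pvRoot_of_fix (by simpa using hfix)).symm, rfl, hb, ha, fun z _ => rfl⟩
  | succ fuel ih =>
    intro p h x hb ha hx hfix
    by_cases hzf : pvPar p x = x
    · have hred : pvFindA (fuel+1) p x = (p, x) := by simp [pvFindA, hzf]
      rw [hred]
      exact ⟨(pvRoot_of_fix hzf).symm, rfl, hb, ha, fun z _ => rfl⟩
    · have hred : pvFindA (fuel+1) p x
          = pvFindA fuel (p.set x (pvPar p (pvPar p x))) (pvPar p (pvPar p x)) := by
        simp [pvFindA, hzf]
      rw [hred]
      obtain ⟨hb', ha', hroots⟩ := pvCompress hb ha hx hzf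
      have hlen' : (p.set x (pvPar p (pvPar p x))).length = p.length := by simp
      have hglt : pvPar p (pvPar p x) < p.length := hb _ (hb _ hx)
      have hgx : h (pvPar p (pvPar p x)) < h x := pvGrand_h_lt hb ha hx hzf
      have hchain : ∀ k, (pvPar (p.set x (pvPar p (pvPar p x))))^[k] (pvPar p (pvPar p x))
          = (pvPar p)^[k] (pvPar p (pvPar p x)) := by
        intro k
        induction k with
        | zero => rfl
        | succ k ihk =>
          rw [Function.iterate_succ_apply', Function.iterate_succ_apply', ihk]
          have hne : (pvPar p)^[k] (pvPar p (pvPar p x)) ≠ x := by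
            intro hEq
            have := pvIter_h_le hb ha hglt k
            rw [hEq] at this; omega
          rw [pvPar_set _ hx, if_neg hne]
      have hWfix : pvPar p ((pvPar p)^[fuel] (pvPar p (pvPar p x)))
          = (pvPar p)^[fuel] (pvPar p (pvPar p x)) := by
        have hW : (pvPar p)^[fuel] (pvPar p (pvPar p x)) = (pvPar p)^[fuel+1] x := by
          calc (pvPar p)^[fuel] (pvPar p (pvPar p x))
              = (pvPar p)^[fuel] ((pvPar p)^[2] x) := rfl
            _ = (pvPar p)^[fuel+2] x := by rw [← Function.iterate_add_apply]
            _ = pvPar p ((pvPar p)^[fuel+1] x) := by rw [Function.iterate_succ_apply']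
            _ = (pvPar p)^[fuel+1] x := hfix
        rw [hW]
        exact hfix
      have hfix' : pvPar (p.set x (pvPar p (pvPar p x)))
            ((pvPar (p.set x (pvPar p (pvPar p x))))^[fuel] (pvPar p (pvPar p x)))
          = (pvPar (p.set x (pvPar p (pvPar p x))))^[fuel] (pvPar p (pvPar p x)) := by
        rw [hchain]
        have hne : (pvPar p)^[fuel] (pvPar p (pvPar p x)) ≠ x := by
          intro hEq
          have := pvIter_h_le hb ha hglt fuel
          rw [hEq] at this; omega
        rw [pvPar_set _ hx, if_neg hne]
        exact hWfix
      obtain ⟨r2, rlen, rb, ra, rroots⟩ :=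
        ih (p.set x (pvPar p (pvPar p x))) h (pvPar p (pvPar p x)) hb' ha'
          (by rw [hlen']; exact hglt) hfix'
      refine ⟨?_, by rw [rlen, hlen'], rb, ra, ?_⟩
      · rw [r2, hroots _ hglt, pvRoot_step hb ha (hb x hx), pvRoot_step hb ha hx]
      · intro z hz
        rw [rroots z (by rw [hlen']; exact hz), hroots z hz]

lemma pvLink {p : List Nat} {h : Nat → Nat} {ri rj : Nat} (hb : pvBnd p) (ha : pvAcy p h)
    (hri : ri < p.length) (hrj : rj < p.length) (hfri : pvPar p ri = ri)
    (hfrj : pvPar p rj = rj) (hne : ri ≠ rj) :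
    pvBnd (p.set ri rj) ∧ (∃ h', pvAcy (p.set ri rj) h') ∧
    (∀ z, z < p.length →
      pvRoot (p.set ri rj) z = if pvRoot p z = ri then rj else pvRoot p z) := by
  have hlen : (p.set ri rj).length = p.length := by simp
  have hb' : pvBnd (p.set ri rj) := by
    intro y hy
    rw [hlen] at hy ⊢
    rw [pvPar_set _ hri]
    by_cases hyr : y = ri
    · simp [hyr, hrj]
    · simp [hyr]; exact hb y hy
  have ha' : pvAcy (p.set ri rj) (fun y => if pvRoot p y = ri then h y + (h rj + 1) else h y) := by
    intro y hy hne'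
    rw [hlen] at hy
    rw [pvPar_set _ hri] at hne' ⊢
    by_cases hyr : y = ri
    · rw [hyr]
      have h1 : pvRoot p rj = rj := pvRoot_of_fix hfrj
      have h2 : pvRoot p ri = ri := pvRoot_of_fix hfri
      have hlt : h rj < h ri + (h rj + 1) := by omega
      simpa [h1, h2, Ne.symm hne] using hlt
    · simp only [if_neg hyr] at hne' ⊢
      have hstep : pvRoot p (pvPar p y) = pvRoot p y := pvRoot_step hb ha hy
      have hhy : h (pvPar p y) < h y := ha y hy hne'
      by_cases hry : pvRoot p y = ri
      · have hlt : h (pvPar p y) + (h rj + 1) < h y + (h rj + 1) := by omega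
        simpa [hstep, hry] using hlt
      · simpa [hstep, hry] using hhy
  refine ⟨hb', ⟨_, ha'⟩, ?_⟩
  have hfrj' : pvPar (p.set ri rj) rj = rj := by
    rw [pvPar_set _ hri, if_neg (Ne.symm hne)]; exact hfrj
  have main : ∀ m z, h z ≤ m → z < p.length →
      pvRoot (p.set ri rj) z = if pvRoot p z = ri then rj else pvRoot p z := by
    intro m
    induction m with
    | zero =>
      intro z hzm hz
      by_cases hzr : z = ri
      · rw [hzr]
        have hstep : pvRoot (p.set ri rj) ri = pvRoot (p.set ri rj) (pvPar (p.set ri rj) ri) :=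
          (pvRoot_step hb' ha' (by rw [hlen]; exact hri)).symm
        rw [hstep, pvPar_set _ hri, if_pos rfl, pvRoot_of_fix hfrj',
          pvRoot_of_fix hfri, if_pos rfl]
      · by_cases hfz : pvPar p z = z
        · have hfz' : pvPar (p.set ri rj) z = z := by
            rw [pvPar_set _ hri, if_neg hzr]; exact hfz
          rw [pvRoot_of_fix hfz', pvRoot_of_fix hfz, if_neg hzr]
        · exfalso; have := ha z hz hfz; omega
    | succ m ih =>
      intro z hzm hz
      by_cases hzr : z = ri
      · rw [hzr]
        have hstep : pvRoot (p.set ri rj) ri = pvRoot (p.set ri rj) (pvPar (p.set ri rj) ri) :=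
          (pvRoot_step hb' ha' (by rw [hlen]; exact hri)).symm
        rw [hstep, pvPar_set _ hri, if_pos rfl, pvRoot_of_fix hfrj',
          pvRoot_of_fix hfri, if_pos rfl]
      · by_cases hfz : pvPar p z = z
        · have hfz' : pvPar (p.set ri rj) z = z := by
            rw [pvPar_set _ hri, if_neg hzr]; exact hfz
          rw [pvRoot_of_fix hfz', pvRoot_of_fix hfz, if_neg hzr]
        · have hstep : pvRoot (p.set ri rj) z = pvRoot (p.set ri rj) (pvPar p z) := by
            have := (pvRoot_step hb' ha' (x := z) (by rw [hlen]; exact hz)).symm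
            rw [pvPar_set _ hri, if_neg hzr] at this
            exact this
          rw [hstep, ih _ (by have := ha z hz hfz; omega) (hb z hz),
            pvRoot_step hb ha hz]
  exact fun z hz => main (h z) z le_rfl hz

-- ---------- the simulation invariant: labels of B classify exactly like roots of A ----------
def pvInv (n : Nat) (p c : List Nat) : Prop :=
  p.length = n ∧ c.length = n ∧ pvBnd p ∧ (∃ h, pvAcy p h) ∧
  (∀ x, x < n → c.getD x 0 < n) ∧
  (∀ x y, x < n → y < n → (c.getD x 0 = c.getD y 0 ↔ pvRoot p x = pvRoot p y))

lemma pvRelabel_getD {c : List Nat} {li lj : Nat} {x : Nat} (hx : x < c.length) :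
    (pvRelabelB c li lj).getD x 0 = if c.getD x 0 = li then lj else c.getD x 0 := by
  unfold pvRelabelB
  rw [List.getD_eq_getElem?_getD, List.getElem?_map,
    List.getElem?_eq_getElem hx, List.getD_eq_getElem?_getD, List.getElem?_eq_getElem hx]
  rfl

lemma pvInv_init (n : Nat) : pvInv n (List.range n) (List.range n) := by
  have hpar : ∀ x, x < n → pvPar (List.range n) x = x := by
    intro x hx
    unfold pvPar
    rw [List.getD_eq_getElem?_getD, List.getElem?_range hx]
    rfl
  have hget : ∀ x, x < n → (List.range n).getD x 0 = x := by
    intro x hx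
    rw [List.getD_eq_getElem?_getD, List.getElem?_range hx]
    rfl
  refine ⟨List.length_range .., List.length_range .., ?_, ⟨fun _ => 0, ?_⟩, ?_, ?_⟩
  · intro x hx
    rw [List.length_range] at hx ⊢
    rw [hpar x hx]; exact hx
  · intro x hx hne
    rw [List.length_range] at hx
    exact absurd (hpar x hx) hne
  · intro x hx; rw [hget x hx]; exact hx
  · intro x y hx hy
    rw [hget x hx, hget y hy, pvRoot_of_fix (hpar x hx), pvRoot_of_fix (hpar y hy)]

lemma pvPairStep {n : Nat} {p c : List Nat} (hInv : pvInv n p c) {i j : Nat}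
    (hi : i < n) (hj : j < n) :
    pvInv n (pvUnionA p i j)
      (if c.getD i 0 ≠ c.getD j 0 then pvRelabelB c (c.getD i 0) (c.getD j 0) else c) := by
  obtain ⟨hpl, hcl, hb, ⟨h, ha⟩, hcb, hcr⟩ := hInv
  have hi' : i < p.length := by rw [hpl]; exact hi
  have hj' : j < p.length := by rw [hpl]; exact hj
  -- find(j) first (Python evaluates the RHS first)
  obtain ⟨hr2j, hlen1, hb1, ha1, hroots1⟩ :=
    pvFind_spec p.length p h j hb ha hj' (pvRoot_fix hb ha hj')
  set p1 := (pvFindA p.length p j).1 with hp1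
  set rj := (pvFindA p.length p j).2 with hrj
  have hi1 : i < p1.length := by rw [hlen1]; exact hi'
  obtain ⟨hr2i, hlen2, hb2, ha2, hroots2⟩ :=
    pvFind_spec p1.length p1 h i hb1 ha1 hi1 (pvRoot_fix hb1 ha1 hi1)
  set p2 := (pvFindA p1.length p1 i).1 with hp2
  set ri := (pvFindA p1.length p1 i).2 with hri
  have hlen2' : p2.length = p.length := by rw [hlen2, hlen1]
  have hrjv : rj = pvRoot p j := hr2j
  have hriv : ri = pvRoot p i := by rw [hr2i, hroots1 i hi']
  have hroots12 : ∀ z, z < p.length → pvRoot p2 z = pvRoot p z := by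
    intro z hz
    rw [hroots2 z (by rw [hlen1]; exact hz), hroots1 z hz]
  have hrjlt : rj < p.length := by rw [hrjv]; exact pvRoot_lt hb hj'
  have hrilt : ri < p.length := by rw [hriv]; exact pvRoot_lt hb hi'
  have hfix_ri : pvPar p2 ri = ri := by
    have : pvRoot p2 i = ri := by rw [hroots12 i hi', hriv]
    rw [← this]
    exact pvRoot_fix hb2 ha2 (by rw [hlen2']; exact hi')
  have hfix_rj : pvPar p2 rj = rj := by
    have : pvRoot p2 j = rj := by rw [hroots12 j hj', hrjv]
    rw [← this]
    exact pvRoot_fix hb2 ha2 (by rw [hlen2']; exact hj')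
  have hUeq : pvUnionA p i j = p2.set ri rj := rfl
  by_cases hcc : c.getD i 0 = c.getD j 0
  · -- equal labels ⇒ equal roots ⇒ the union is a no-op on the parent array
    have hreq : pvRoot p i = pvRoot p j := (hcr i j hi hj).mp hcc
    have hrirj : ri = rj := by rw [hriv, hrjv, hreq]
    have hset : pvUnionA p i j = p2 := by
      rw [hUeq, hrirj]
      have hself := pvSet_getD_self (p := p2) (i := rj) (by rw [hlen2']; exact hrjlt)
      have hgd : p2.getD rj 0 = rj := hfix_rj
      rwa [hgd] at hself
    rw [hset, if_neg (by simpa using hcc)]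
    refine ⟨by rw [hlen2', hpl], hcl, hb2, ⟨h, ha2⟩, hcb, ?_⟩
    intro x y hx hy
    rw [hroots12 x (by rw [hpl]; exact hx), hroots12 y (by rw [hpl]; exact hy)]
    exact hcr x y hx hy
  · -- distinct labels ⇒ distinct roots ⇒ link root ri under root rj, relabel li ↦ lj in B
    have hrne : ri ≠ rj := by
      rw [hriv, hrjv]
      intro hEq
      exact hcc ((hcr i j hi hj).mpr hEq)
    obtain ⟨hb3, ⟨h3, ha3⟩, hroots3⟩ :=
      pvLink hb2 ha2 (by rw [hlen2']; exact hrilt) (by rw [hlen2']; exact hrjlt)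
        hfix_ri hfix_rj hrne
    rw [hUeq, if_pos hcc]
    have hroots3' : ∀ z, z < n →
        pvRoot (p2.set ri rj) z = if pvRoot p z = pvRoot p i then pvRoot p j else pvRoot p z := by
      intro z hz
      rw [hroots3 z (by rw [hlen2', hpl]; exact hz), hroots12 z (by rw [hpl]; exact hz),
        hriv, hrjv]
    have hrel : ∀ x, x < n → (pvRelabelB c (c.getD i 0) (c.getD j 0)).getD x 0
        = if c.getD x 0 = c.getD i 0 then c.getD j 0 else c.getD x 0 := by
      intro x hx
      exact pvRelabel_getD (by rw [hcl]; exact hx)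
    refine ⟨by simp [hlen2', hpl], by simp [pvRelabelB, hcl], hb3, ⟨h3, ha3⟩, ?_, ?_⟩
    · intro x hx
      rw [hrel x hx]
      split
      · exact hcb j hj
      · exact hcb x hx
    · intro x y hx hy
      rw [hrel x hx, hrel y hy, hroots3' x hx, hroots3' y hy]
      by_cases hx1 : c.getD x 0 = c.getD i 0
      · rw [if_pos hx1, if_pos ((hcr x i hx hi).mp hx1)]
        by_cases hy1 : c.getD y 0 = c.getD i 0
        · rw [if_pos hy1, if_pos ((hcr y i hy hi).mp hy1)]
          exact iff_of_true rfl rfl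
        · rw [if_neg hy1, if_neg (fun hEq => hy1 ((hcr y i hy hi).mpr hEq))]
          exact hcr j y hj hy
      · rw [if_neg hx1, if_neg (fun hEq => hx1 ((hcr x i hx hi).mpr hEq))]
        by_cases hy1 : c.getD y 0 = c.getD i 0
        · rw [if_pos hy1, if_pos ((hcr y i hy hi).mp hy1)]
          exact hcr x j hx hj
        · rw [if_neg hy1, if_neg (fun hEq => hy1 ((hcr y i hy hi).mpr hEq))]
          exact hcr x y hx hy

-- a fold over the same element list preserves a binary relation between two accumulators
lemma pvFoldRel {α β γ : Type} {R : α → β → Prop} {f : α → γ → α} {g : β → γ → β} :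
    ∀ (L : List γ) (a : α) (b : β), R a b →
      (∀ a b x, x ∈ L → R a b → R (f a x) (g b x)) →
      R (L.foldl f a) (L.foldl g b) := by
  intro L
  induction L with
  | nil => intro a b hR _; exact hR
  | cons x L ih =>
    intro a b hR hstep
    exact ih (f a x) (g b x) (hstep a b x (List.mem_cons_self ..) hR)
      (fun a b y hy => hstep a b y (List.mem_cons_of_mem _ hy))

lemma pvLoops_inv (evs : List (Int × Int × String)) :
    pvInv evs.length (pvUnionLoopA evs) (pvCompLoopB evs) := by
  unfold pvUnionLoopA pvCompLoopB
  apply pvFoldRel _ _ _ (pvInv_init evs.length)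
  intro p c i hiL hInv
  have hi : i < evs.length := List.mem_range.mp hiL
  apply pvFoldRel _ _ _ hInv
  intro p' c' j hjL hInv'
  have hj : j < evs.length := by
    have := List.mem_range'_1.mp hjL
    omega
  by_cases ho : pvStart evs i < pvEnd evs j ∧ pvStart evs j < pvEnd evs i
  · rw [if_pos ho]
    by_cases hne : c'.getD i 0 ≠ c'.getD j 0
    · rw [if_pos ⟨ho.1, ho.2, hne⟩]
      have := pvPairStep hInv' hi hj
      rw [if_pos hne] at this
      exact this
    · rw [if_neg (fun hc => hne hc.2.2)]
      have := pvPairStep hInv' hi hj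
      rw [if_neg hne] at this
      exact this
  · rw [if_neg ho, if_neg (fun hc => ho ⟨hc.1, hc.2.1⟩)]
    exact hInv'

-- ---------- the three result loops, characterized against a fixed root/label function ----------
lemma pvGm_spec (col : List Int) (rt : Nat → Nat) {n : Nat} {h : Nat → Nat} :
    ∀ (L : List Nat) (p : List Nat) (gm : PySem.Dict Nat Int),
    p.length = n → pvBnd p → pvAcy p h → (∀ x ∈ L, x < n) →
    (∀ z, z < n → pvRoot p z = rt z) →
    (let res := L.foldl (fun st i =>
        ((pvFindA st.1.length st.1 i).1,
         st.2.insert (pvFindA st.1.length st.1 i).2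
           (max (st.2.getD (pvFindA st.1.length st.1 i).2 0) (col.getD i 0)))) (p, gm)
     res.1.length = n ∧ pvBnd res.1 ∧ pvAcy res.1 h ∧ (∀ z, z < n → pvRoot res.1 z = rt z) ∧
     (∀ g, res.2.getD g 0 =
        (L.filter (fun j => rt j == g)).foldl (fun m j => max m (col.getD j 0)) (gm.getD g 0))) := by
  intro L
  induction L with
  | nil => intro p gm hpl hb ha _ hrt; exact ⟨hpl, hb, ha, hrt, fun g => rfl⟩
  | cons i L ih =>
    intro p gm hpl hb ha hmem hrt
    have hi : i < n := hmem i (List.mem_cons_self ..)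
    have hi' : i < p.length := by rw [hpl]; exact hi
    obtain ⟨hr2, hlen1, hb1, ha1, hroots1⟩ :=
      pvFind_spec p.length p h i hb ha hi' (pvRoot_fix hb ha hi')
    have hlen1' : (pvFindA p.length p i).1.length = n := by rw [hlen1, hpl]
    have hrt1 : ∀ z, z < n → pvRoot (pvFindA p.length p i).1 z = rt z := by
      intro z hz
      rw [hroots1 z (by rw [hpl]; exact hz)]
      exact hrt z hz
    have hkey : (pvFindA p.length p i).2 = rt i := by rw [hr2]; exact hrt i hi
    have hfold := ih (pvFindA p.length p i).1
      (gm.insert (pvFindA p.length p i).2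
        (max (gm.getD (pvFindA p.length p i).2 0) (col.getD i 0)))
      hlen1' hb1 ha1 (fun x hx => hmem x (List.mem_cons_of_mem _ hx)) hrt1
    simp only [List.foldl_cons]
    refine ⟨hfold.1, hfold.2.1, hfold.2.2.1, hfold.2.2.2.1, ?_⟩
    intro g
    rw [hfold.2.2.2.2 g]
    rw [hkey]
    by_cases hg : rt i = g
    · rw [List.filter_cons_of_pos (by simp [hg]), List.foldl_cons]
      rw [PySem.Dict.getD_insert, if_pos hg.symm, hg]
    · rw [List.filter_cons_of_neg (by simp [hg])]
      rw [PySem.Dict.getD_insert, if_neg (fun hEq => hg hEq.symm)]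

lemma pvOut_spec (evs : List (Int × Int × String)) (col : List Int) (gm : PySem.Dict Nat Int)
    (rt : Nat → Nat) {n : Nat} {h : Nat → Nat} :
    ∀ (L : List Nat) (p : List Nat) (acc : List (String × Int × Int)),
    p.length = n → pvBnd p → pvAcy p h → (∀ x ∈ L, x < n) →
    (∀ z, z < n → pvRoot p z = rt z) →
    (L.foldl (fun st i =>
        ((pvFindA st.1.length st.1 i).1,
         st.2 ++ [(pvData evs i, col.getD i 0, gm.getD (pvFindA st.1.length st.1 i).2 0 + 1)]))
        (p, acc)).2
      = acc ++ L.map (fun i => (pvData evs i, col.getD i 0, gm.getD (rt i) 0 + 1)) := by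
  intro L
  induction L with
  | nil => intro p acc _ _ _ _ _; simp
  | cons i L ih =>
    intro p acc hpl hb ha hmem hrt
    have hi : i < n := hmem i (List.mem_cons_self ..)
    have hi' : i < p.length := by rw [hpl]; exact hi
    obtain ⟨hr2, hlen1, hb1, ha1, hroots1⟩ :=
      pvFind_spec p.length p h i hb ha hi' (pvRoot_fix hb ha hi')
    have hlen1' : (pvFindA p.length p i).1.length = n := by rw [hlen1, hpl]
    have hrt1 : ∀ z, z < n → pvRoot (pvFindA p.length p i).1 z = rt z := by
      intro z hz
      rw [hroots1 z (by rw [hpl]; exact hz)]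
      exact hrt z hz
    have hkey : (pvFindA p.length p i).2 = rt i := by rw [hr2]; exact hrt i hi
    simp only [List.foldl_cons]
    rw [ih (pvFindA p.length p i).1
      (acc ++ [(pvData evs i, col.getD i 0, gm.getD (pvFindA p.length p i).2 0 + 1)])
      hlen1' hb1 ha1 (fun x hx => hmem x (List.mem_cons_of_mem _ hx)) hrt1]
    rw [hkey]
    simp

lemma pvGetD_replicate {n l : Nat} : (List.replicate n (0 : Int)).getD l 0 = 0 := by
  rw [List.getD_eq_getElem?_getD]
  rcases Nat.lt_or_ge l n with h | h
  · rw [List.getElem?_eq_getElem (by simpa using h)]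
    simp
  · rw [List.getElem?_eq_none (by simpa using h)]
    rfl

lemma pvGetD_set_eq_int {p : List Int} {i : Nat} (v : Int) (h : i < p.length) :
    (p.set i v).getD i 0 = v := by
  simp [List.getD_eq_getElem?_getD, List.getElem?_set, h]

lemma pvGetD_set_ne_int {p : List Int} {i j : Nat} (v : Int) (h : j ≠ i) :
    (p.set i v).getD j 0 = p.getD j 0 := by
  simp [List.getD_eq_getElem?_getD, List.getElem?_set, (Ne.symm h : i ≠ j)]

lemma pvBest_spec (comp : List Nat) (col : List Int) {n : Nat}
    (hcb : ∀ x, x < n → comp.getD x 0 < n) :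
    ∀ (L : List Nat) (best : List Int), best.length = n → (∀ x ∈ L, x < n) →
    (L.foldl (fun best j =>
        if col.getD j 0 > best.getD (comp.getD j 0) 0 then
          best.set (comp.getD j 0) (col.getD j 0)
        else best) best).length = n ∧
    (∀ l, (L.foldl (fun best j =>
        if col.getD j 0 > best.getD (comp.getD j 0) 0 then
          best.set (comp.getD j 0) (col.getD j 0)
        else best) best).getD l 0
      = (L.filter (fun j => comp.getD j 0 == l)).foldl
          (fun m j => max m (col.getD j 0)) (best.getD l 0)) := by
  intro L
  induction L with
  | nil => intro best hbl _; exact ⟨hbl, fun l => rfl⟩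
  | cons j L ih =>
    intro best hbl hmem
    have hj : j < n := hmem j (List.mem_cons_self ..)
    have hcj : comp.getD j 0 < n := hcb j hj
    have hcj' : comp.getD j 0 < best.length := by rw [hbl]; exact hcj
    simp only [List.foldl_cons]
    set best1 := if col.getD j 0 > best.getD (comp.getD j 0) 0 then
        best.set (comp.getD j 0) (col.getD j 0) else best with hbest1
    have hbl1 : best1.length = n := by
      rw [hbest1]; split <;> simp [hbl]
    obtain ⟨hfl, hfg⟩ := ih best1 hbl1 (fun x hx => hmem x (List.mem_cons_of_mem _ hx))
    refine ⟨hfl, ?_⟩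
    intro l
    rw [hfg l]
    by_cases hl : comp.getD j 0 = l
    · rw [List.filter_cons_of_pos (by simpa using hl), List.foldl_cons]
      have hseed : best1.getD l 0 = max (best.getD l 0) (col.getD j 0) := by
        rw [hbest1, ← hl]
        split
        · next hgt =>
          rw [pvGetD_set_eq_int _ hcj']
          omega
        · next hgt =>
          omega
      rw [hseed]
    · rw [List.filter_cons_of_neg (by simpa using hl)]
      have hseed : best1.getD l 0 = best.getD l 0 := by
        rw [hbest1]
        split
        · exact pvGetD_set_ne_int _ (fun hEq => hl hEq.symm)
        · rfl
      rw [hseed]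

-- ---------- the column assignment: mex over the used-set = first-fit over column end maxima ----------
lemma pvFoldAdd_mem (P : Nat → Prop) [DecidablePred P] (f : Nat → Int) (x : Int) :
    ∀ (L : List Nat) (acc : PySem.Set Int),
    (x ∈ L.foldl (fun acc j => if P j then PySem.Set.add acc (f j) else acc) acc ↔
      x ∈ acc ∨ ∃ j ∈ L, P j ∧ f j = x) := by
  intro L
  induction L with
  | nil => intro acc; simp
  | cons a L ih =>
    intro acc
    rw [List.foldl_cons]
    by_cases hP : P a
    · rw [if_pos hP, ih]
      rw [PySem.Set.mem_add]
      constructor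
      · rintro (⟨h1 | h2⟩ | h3)
        · exact Or.inl h1
        · exact Or.inr ⟨a, List.mem_cons_self .., hP, h2.symm⟩
        · obtain ⟨j, hj, hPj, hfj⟩ := h3
          exact Or.inr ⟨j, List.mem_cons_of_mem _ hj, hPj, hfj⟩
      · rintro (h1 | ⟨j, hj, hPj, hfj⟩)
        · exact Or.inl (Or.inl h1)
        · rcases List.mem_cons.mp hj with hja | hjL
          · subst hja; exact Or.inl (Or.inr hfj.symm)
          · exact Or.inr ⟨j, hjL, hPj, hfj⟩
    · rw [if_neg hP, ih]
      constructor
      · rintro (h1 | ⟨j, hj, hPj, hfj⟩)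
        · exact Or.inl h1
        · exact Or.inr ⟨j, List.mem_cons_of_mem _ hj, hPj, hfj⟩
      · rintro (h1 | ⟨j, hj, hPj, hfj⟩)
        · exact Or.inl h1
        · rcases List.mem_cons.mp hj with hja | hjL
          · subst hja; exact absurd hPj hP
          · exact Or.inr ⟨j, hjL, hPj, hfj⟩

lemma pvFoldAdd_nodup (P : Nat → Prop) [DecidablePred P] (f : Nat → Int) :
    ∀ (L : List Nat) (acc : PySem.Set Int), acc.Nodup →
    (L.foldl (fun acc j => if P j then PySem.Set.add acc (f j) else acc) acc).Nodup := by
  intro L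
  induction L with
  | nil => intro acc h; exact h
  | cons a L ih =>
    intro acc h
    rw [List.foldl_cons]
    by_cases hP : P a
    · rw [if_pos hP]; exact ih _ (PySem.Set.nodup_add _ _ h)
    · rw [if_neg hP]; exact ih _ h

lemma pvCountP_succ : ∀ {used : List Int} {c : Int}, used.Nodup → c ∈ used →
    used.countP (fun d => decide (c ≤ d)) = used.countP (fun d => decide (c + 1 ≤ d)) + 1 := by
  intro used
  induction used with
  | nil => intro c _ hc; simp at hc
  | cons a t ih =>
    intro c hnd hc
    have hndt : t.Nodup := (List.nodup_cons.mp hnd).2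
    by_cases hac : a = c
    · subst hac
      have hnt : a ∉ t := (List.nodup_cons.mp hnd).1
      have htail : t.countP (fun d => decide (a ≤ d)) = t.countP (fun d => decide (a + 1 ≤ d)) := by
        apply List.countP_congr
        intro d hd
        have hda : d ≠ a := fun hEq => hnt (hEq ▸ hd)
        have : (a ≤ d) ↔ (a + 1 ≤ d) := by omega
        simp [this]
      rw [List.countP_cons, List.countP_cons, htail]
      simp
    · have hct : c ∈ t := by
        rcases List.mem_cons.mp hc with h1 | h2
        · exact absurd h1.symm hac
        · exact h2
      have hhd : decide (c ≤ a) = decide (c + 1 ≤ a) := by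
        have : (c ≤ a) ↔ (c + 1 ≤ a) := by
          constructor
          · intro h1
            rcases lt_or_eq_of_le h1 with h2 | h2
            · omega
            · exact absurd h2 (fun hEq => hac hEq.symm)
          · intro h1; omega
        simp [this]
      rw [List.countP_cons, List.countP_cons, ih hndt hct, hhd]
      omega

lemma pvMex_spec (used : PySem.Set Int) (hnd : used.Nodup) :
    ∀ (fuel : Nat) (c : Int), used.countP (fun d => decide (c ≤ d)) < fuel →
    (pvMexA used fuel c ∉ used ∧ c ≤ pvMexA used fuel c ∧
     ∀ d, c ≤ d → d < pvMexA used fuel c → d ∈ used) := by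
  intro fuel
  induction fuel with
  | zero => intro c h; omega
  | succ fuel ih =>
    intro c h
    by_cases hc : PySem.Set.contains used c = true
    · have hcm : c ∈ used := List.mem_of_elem_eq_true hc
      have hred : pvMexA used (fuel+1) c = pvMexA used fuel (c+1) := by
        rw [pvMexA, if_pos hc]
      rw [hred]
      have hcnt := pvCountP_succ hnd hcm
      obtain ⟨h1, h2, h3⟩ := ih (c+1) (by omega)
      refine ⟨h1, by omega, ?_⟩
      intro d hcd hdm
      by_cases hdc : d = c
      · subst hdc; exact hcm
      · exact h3 d (by omega) hdm
    · have hred : pvMexA used (fuel+1) c = c := by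
        rw [pvMexA, if_neg hc]
      rw [hred]
      refine ⟨fun hmem => hc (List.elem_eq_true_of_mem hmem), le_refl c, ?_⟩
      intro d h1 h2
      omega

lemma pvFirstFree_none {s : Int} : ∀ {colend : List Int}, pvFirstFreeB colend s = none →
    ∀ cn, cn < colend.length → s < colend.getD cn 0 := by
  intro colend
  induction colend with
  | nil => intro _ cn hcn; simp at hcn
  | cons e rest ih =>
    intro hff cn hcn
    rw [pvFirstFreeB] at hff
    by_cases hes : e ≤ s
    · rw [if_pos hes] at hff; exact absurd hff (by simp)
    · rw [if_neg hes] at hff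
      have hrest : pvFirstFreeB rest s = none := by
        cases hr : pvFirstFreeB rest s with
        | none => rfl
        | some c => rw [hr] at hff; simp at hff
      cases cn with
      | zero => simpa using (by omega : s < e)
      | succ cn =>
        rw [List.getD_cons_succ]
        exact ih hrest cn (by simpa using hcn)

lemma pvFirstFree_some {s : Int} : ∀ {colend : List Int} {c : Nat},
    pvFirstFreeB colend s = some c →
    c < colend.length ∧ colend.getD c 0 ≤ s ∧ ∀ cn, cn < c → s < colend.getD cn 0 := by
  intro colend
  induction colend with
  | nil => intro c hff; exact absurd hff (by simp [pvFirstFreeB])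
  | cons e rest ih =>
    intro c hff
    rw [pvFirstFreeB] at hff
    by_cases hes : e ≤ s
    · rw [if_pos hes] at hff
      have hc0 : c = 0 := by simpa using hff.symm
      subst hc0
      refine ⟨by simp, by simpa using hes, ?_⟩
      intro cn hcn; omega
    · rw [if_neg hes] at hff
      cases hr : pvFirstFreeB rest s with
      | none => rw [hr] at hff; simp at hff
      | some c' =>
        rw [hr] at hff
        simp only [Option.map_some] at hff
        have hcc : c = c' + 1 := by simpa using hff.symm
        subst hcc
        obtain ⟨h1, h2, h3⟩ := ih hr
        refine ⟨by simpa using h1, by simpa using h2, ?_⟩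
        intro cn hcn
        cases cn with
        | zero => simpa using (by omega : s < e)
        | succ cn =>
          rw [List.getD_cons_succ]
          exact h3 cn (by omega)

lemma pvGetD_append_left {l l' : List Int} {j : Nat} (h : j < l.length) :
    (l ++ l').getD j 0 = l.getD j 0 := by
  rw [List.getD_eq_getElem?_getD, List.getElem?_append_left h, ← List.getD_eq_getElem?_getD]

lemma pvGetD_append_len {l : List Int} {v : Int} :
    (l ++ [v]).getD l.length 0 = v := by
  rw [List.getD_eq_getElem?_getD, List.getElem?_append_right (le_refl _)]
  simp

def pvColInv (evs : List (Int × Int × String)) (k : Nat) (col : List Int)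
    (colend : List Int) : Prop :=
  col.length = k ∧
  (∀ j, j < k → ∃ cn : Nat, col.getD j 0 = (cn : Int) ∧ cn < colend.length) ∧
  (∀ cn : Nat, cn < colend.length →
    ∃ j, j < k ∧ col.getD j 0 = (cn : Int) ∧ pvEnd evs j = colend.getD cn 0) ∧
  (∀ j (cn : Nat), j < k → col.getD j 0 = (cn : Int) → pvEnd evs j ≤ colend.getD cn 0)

lemma pvCols_pref (evs : List (Int × Int × String)) :
    ∀ k, k ≤ evs.length →
    ((List.range k).foldl (fun col i =>
        col ++ [pvMexA (pvUsedA evs col i) ((pvUsedA evs col i).length + 1) 0]) []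
      = ((evs.take k).foldl pvColStepB ([], [])).1) ∧
    pvColInv evs k (((evs.take k).foldl pvColStepB ([], [])).1)
      (((evs.take k).foldl pvColStepB ([], [])).2) := by
  intro k
  induction k with
  | zero =>
    intro _
    refine ⟨rfl, rfl, ?_, ?_, ?_⟩
    · intro j hj; omega
    · intro cn hcn; simp at hcn
    · intro j cn hj; omega
  | succ k ih =>
    intro hk1
    have hk : k < evs.length := by omega
    obtain ⟨heq, hinv⟩ := ih (by omega)
    unfold pvColInv at hinv
    obtain ⟨hlen, hbnd, hreal, hub⟩ := hinv
    set q := (evs.take k).foldl pvColStepB ([], []) with hq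
    have hgetk : evs.getD k ((0:Int), (0:Int), "") = evs[k] := by
      rw [List.getD_eq_getElem?_getD, List.getElem?_eq_getElem hk]; rfl
    have htake : evs.take (k+1) = evs.take k ++ [evs.getD k ((0:Int), (0:Int), "")] := by
      rw [List.take_succ, List.getElem?_eq_getElem hk, hgetk]; rfl
    have hBstep : (evs.take (k+1)).foldl pvColStepB ([], [])
        = pvColStepB q (evs.getD k ((0:Int), (0:Int), "")) := by
      rw [htake, List.foldl_append]; rfl
    have hAstep : (List.range (k+1)).foldl (fun col i =>
          col ++ [pvMexA (pvUsedA evs col i) ((pvUsedA evs col i).length + 1) 0]) []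
        = q.1 ++ [pvMexA (pvUsedA evs q.1 k) ((pvUsedA evs q.1 k).length + 1) 0] := by
      rw [List.range_succ, List.foldl_append, heq]; rfl
    set s := pvStart evs k with hs
    set e := pvEnd evs k with he
    set used := pvUsedA evs q.1 k with hused
    have hev1 : (evs.getD k ((0:Int), (0:Int), "")).1 = s := rfl
    have hev2 : (evs.getD k ((0:Int), (0:Int), "")).2.1 = e := rfl
    -- membership characterization of the used-set through the column invariant
    have hmemused : ∀ x : Int, x ∈ used ↔ ∃ j, j < k ∧ pvEnd evs j > s ∧ q.1.getD j 0 = x := by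
      intro x
      rw [hused]
      unfold pvUsedA
      rw [pvFoldAdd_mem (fun j => pvEnd evs j > pvStart evs k) (fun j => q.1.getD j 0) x]
      constructor
      · rintro (h1 | ⟨j, hj, hPj, hfj⟩)
        · simp [PySem.Set.empty] at h1
        · exact ⟨j, List.mem_range.mp hj, hPj, hfj⟩
      · rintro ⟨j, hj, hPj, hfj⟩
        exact Or.inr ⟨j, List.mem_range.mpr hj, hPj, hfj⟩
    have hnodup : used.Nodup := by
      rw [hused]; unfold pvUsedA
      exact pvFoldAdd_nodup _ _ _ _ List.nodup_nil
    have hchar : ∀ x : Int, x ∈ used ↔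
        ∃ cn : Nat, cn < q.2.length ∧ x = (cn : Int) ∧ s < q.2.getD cn 0 := by
      intro x
      rw [hmemused x]
      constructor
      · rintro ⟨j, hj, hPj, hfj⟩
        obtain ⟨cn, hcol, hcn⟩ := hbnd j hj
        refine ⟨cn, hcn, by rw [← hfj, hcol], ?_⟩
        have := hub j cn hj hcol
        omega
      · rintro ⟨cn, hcn, hx, hce⟩
        obtain ⟨j, hj, hcol, hend⟩ := hreal cn hcn
        exact ⟨j, hj, by omega, by rw [hcol, hx]⟩
    obtain ⟨hm1, hm2, hm3⟩ := pvMex_spec used hnodup (used.length + 1) 0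
      (by have := List.countP_le_length (l := used) (p := fun d => decide (0 ≤ d)); omega)
    set m := pvMexA used (used.length + 1) 0 with hm
    cases hff : pvFirstFreeB q.2 s with
    | some c =>
      obtain ⟨hc1, hc2, hc3⟩ := pvFirstFree_some hff
      -- the mex equals c
      have htni : (c : Int) ∉ used := by
        rw [hchar]
        rintro ⟨cn, hcn, hx, hce⟩
        have : cn = c := by exact_mod_cast hx.symm
        subst this
        omega
      have htall : ∀ d : Int, 0 ≤ d → d < (c : Int) → d ∈ used := by
        intro d hd0 hdc
        have hdn : d = ((d.toNat : Nat) : Int) := by omega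
        have hdnc : d.toNat < c := by omega
        rw [hchar]
        exact ⟨d.toNat, by omega, hdn, hc3 d.toNat hdnc⟩
      have hmc : m = (c : Int) := by
        rcases lt_trichotomy m (c : Int) with hlt | heqm | hgt
        · exact absurd (htall m hm2 hlt) hm1
        · exact heqm
        · exact absurd (hm3 (c : Int) (by omega) hgt) htni
      have hBred : pvColStepB q (evs.getD k ((0:Int), (0:Int), "")) =
          (q.1 ++ [(c : Int)],
           if e > q.2.getD c 0 then q.2.set c e else q.2) := by
        unfold pvColStepB
        rw [hev1, hff, hev2]
      constructor
      · rw [hAstep, hBstep, hBred, hmc]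
      · rw [hBstep, hBred]
        unfold pvColInv
        have hcelen : (if e > q.2.getD c 0 then q.2.set c e else q.2).length = q.2.length := by
          split <;> simp
        have hce_ge : ∀ cn : Nat, cn < q.2.length →
            q.2.getD cn 0 ≤ (if e > q.2.getD c 0 then q.2.set c e else q.2).getD cn 0 := by
          intro cn hcn
          split
          · next hgt =>
            by_cases hcnc : cn = c
            · subst hcnc
              rw [pvGetD_set_eq_int _ (by omega)]
              omega
            · rw [pvGetD_set_ne_int _ hcnc]
          · exact le_refl _
        refine ⟨by simp [hlen], ?_, ?_, ?_⟩
        · intro j hj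
          by_cases hjk : j < k
          · obtain ⟨cn, hcol, hcn⟩ := hbnd j hjk
            exact ⟨cn, by rw [pvGetD_append_left (by omega), hcol], by rw [hcelen]; omega⟩
          · have hjeq : j = k := by omega
            subst hjeq
            refine ⟨c, ?_, by rw [hcelen]; omega⟩
            have : q.1.length = j := hlen
            rw [← this, pvGetD_append_len]
        · intro cn hcn
          rw [hcelen] at hcn
          by_cases hcnc : cn = c
          · subst hcnc
            by_cases hgt : e > q.2.getD cn 0
            · refine ⟨k, by omega, ?_, ?_⟩
              · have : q.1.length = k := hlen
                rw [← this, pvGetD_append_len]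
              · rw [if_pos hgt, pvGetD_set_eq_int _ (by omega), ← he]
            · obtain ⟨j, hj, hcol, hend⟩ := hreal cn hcn
              refine ⟨j, by omega, by rw [pvGetD_append_left (by omega), hcol], ?_⟩
              rw [if_neg hgt]
              exact hend
          · obtain ⟨j, hj, hcol, hend⟩ := hreal cn hcn
            refine ⟨j, by omega, by rw [pvGetD_append_left (by omega), hcol], ?_⟩
            have hsame : (if e > q.2.getD c 0 then q.2.set c e else q.2).getD cn 0
                = q.2.getD cn 0 := by
              split
              · exact pvGetD_set_ne_int _ hcnc
              · rfl
            rw [hsame]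
            exact hend
        · intro j cn hj hcol
          by_cases hjk : j < k
          · rw [pvGetD_append_left (by omega)] at hcol
            have hold := hub j cn hjk hcol
            obtain ⟨cn', hcol', hcn'⟩ := hbnd j hjk
            have : cn' = cn := by
              have := hcol'.symm.trans hcol
              exact_mod_cast this
            subst this
            exact le_trans hold (hce_ge cn' hcn')
          · have hjeq : j = k := by omega
            subst hjeq
            have : q.1.length = j := hlen
            rw [← this, pvGetD_append_len] at hcol
            have hcnc : cn = c := by exact_mod_cast hcol.symm
            subst hcnc
            by_cases hgt : e > q.2.getD cn 0
            · rw [if_pos hgt, pvGetD_set_eq_int _ (by omega), ← he]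
            · rw [if_neg hgt]
              show pvEnd evs j ≤ q.2.getD cn 0
              rw [← he]
              omega
    | none =>
      have hnone := pvFirstFree_none hff
      have htni : ((q.2.length : Nat) : Int) ∉ used := by
        rw [hchar]
        rintro ⟨cn, hcn, hx, hce⟩
        have : cn = q.2.length := by exact_mod_cast hx.symm
        omega
      have htall : ∀ d : Int, 0 ≤ d → d < (q.2.length : Int) → d ∈ used := by
        intro d hd0 hdc
        have hdn : d = ((d.toNat : Nat) : Int) := by omega
        have hdnc : d.toNat < q.2.length := by omega
        rw [hchar]
        exact ⟨d.toNat, hdnc, hdn, hnone d.toNat hdnc⟩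
      have hmc : m = (q.2.length : Int) := by
        rcases lt_trichotomy m (q.2.length : Int) with hlt | heqm | hgt
        · exact absurd (htall m hm2 hlt) hm1
        · exact heqm
        · exact absurd (hm3 (q.2.length : Int) (by omega) hgt) htni
      have hBred : pvColStepB q (evs.getD k ((0:Int), (0:Int), "")) =
          (q.1 ++ [(q.2.length : Int)], q.2 ++ [e]) := by
        unfold pvColStepB
        rw [hev1, hff, hev2]
      constructor
      · rw [hAstep, hBstep, hBred, hmc]
      · rw [hBstep, hBred]
        unfold pvColInv
        refine ⟨by simp [hlen], ?_, ?_, ?_⟩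
        · intro j hj
          by_cases hjk : j < k
          · obtain ⟨cn, hcol, hcn⟩ := hbnd j hjk
            refine ⟨cn, by rw [pvGetD_append_left (by omega), hcol], by simp; omega⟩
          · have hjeq : j = k := by omega
            subst hjeq
            refine ⟨q.2.length, ?_, by simp⟩
            have : q.1.length = j := hlen
            rw [← this, pvGetD_append_len]
        · intro cn hcn
          simp only [List.length_append, List.length_cons, List.length_nil] at hcn
          by_cases hcnl : cn < q.2.length
          · obtain ⟨j, hj, hcol, hend⟩ := hreal cn hcnl
            exact ⟨j, by omega, by rw [pvGetD_append_left (by omega), hcol],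
              by rw [pvGetD_append_left hcnl]; exact hend⟩
          · have hcnq : cn = q.2.length := by omega
            subst hcnq
            refine ⟨k, by omega, ?_, ?_⟩
            · have : q.1.length = k := hlen
              rw [← this, pvGetD_append_len]
            · rw [pvGetD_append_len, ← he]
        · intro j cn hj hcol
          by_cases hjk : j < k
          · rw [pvGetD_append_left (by omega)] at hcol
            obtain ⟨cn', hcol', hcn'⟩ := hbnd j hjk
            have hsame : cn' = cn := by
              have := hcol'.symm.trans hcol
              exact_mod_cast this
            subst hsame
            rw [pvGetD_append_left hcn']
            exact hub j cn' hjk hcol'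
          · have hjeq : j = k := by omega
            subst hjeq
            have : q.1.length = j := hlen
            rw [← this, pvGetD_append_len] at hcol
            have hcnq : cn = q.2.length := by exact_mod_cast hcol.symm
            subst hcnq
            rw [pvGetD_append_len, ← he]

lemma pvCols_eq (evs : List (Int × Int × String)) : pvColsA evs = (pvColsB evs).1 := by
  have hA : pvColsA evs = (List.range evs.length).foldl (fun col i =>
      col ++ [pvMexA (pvUsedA evs col i) ((pvUsedA evs col i).length + 1) 0]) [] := rfl
  have hB : pvColsB evs = (evs.take evs.length).foldl pvColStepB ([], []) := by
    rw [List.take_length]; rfl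
  rw [hA, hB]
  exact (pvCols_pref evs evs.length (le_refl _)).1

-- ===== VERDICT (by name: the statement is the Claim_ definition above) =====
theorem assign_columns_spec : Claim_equal_assign_columns := by
  unfold Claim_equal_assign_columns
  intro events _
  unfold Spec_assign_columns
  by_cases hE : events = []
  · unfold assign_columns assign_columns_alt
    rw [if_pos hE, if_pos hE]
  · have hAval0 : assign_columns events
        = (pvOutLoopA (PySem.List.sorted events (fun x => x.1) false)
            (pvColsA (PySem.List.sorted events (fun x => x.1) false))
            (pvGmLoopA (PySem.List.sorted events (fun x => x.1) false)
              (pvColsA (PySem.List.sorted events (fun x => x.1) false))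
              (pvUnionLoopA (PySem.List.sorted events (fun x => x.1) false))).2
            (pvGmLoopA (PySem.List.sorted events (fun x => x.1) false)
              (pvColsA (PySem.List.sorted events (fun x => x.1) false))
              (pvUnionLoopA (PySem.List.sorted events (fun x => x.1) false))).1).2 := by
      unfold assign_columns
      rw [if_neg hE]
    have hBval0 : assign_columns_alt events
        = (List.range (PySem.List.sorted events (fun x => x.1) false).length).map
            (fun i => (pvData (PySem.List.sorted events (fun x => x.1) false) i,
              ((pvColsB (PySem.List.sorted events (fun x => x.1) false)).1).getD i 0,
              (pvBestLoopB (PySem.List.sorted events (fun x => x.1) false).length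
                (pvCompLoopB (PySem.List.sorted events (fun x => x.1) false))
                (pvColsB (PySem.List.sorted events (fun x => x.1) false)).1).getD
                ((pvCompLoopB (PySem.List.sorted events (fun x => x.1) false)).getD i 0) 0
                + 1)) := by
      unfold assign_columns_alt
      rw [if_neg hE]
    rw [hAval0, hBval0]
    set evs := PySem.List.sorted events (fun x => x.1) false with hevs
    set p := pvUnionLoopA evs with hpdef
    set c := pvCompLoopB evs with hcdef
    set colA := pvColsA evs with hcolAdef
    have hcolsBA : (pvColsB evs).1 = colA := (pvCols_eq evs).symm
    have hInv := pvLoops_inv evs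
    unfold pvInv at hInv
    obtain ⟨hpl, hcl, hb, ⟨h, ha⟩, hcb, hcr⟩ := hInv
    -- gm loop
    have hgm := pvGm_spec colA (fun z => pvRoot p z) (L := List.range evs.length)
      (p := p) (gm := PySem.Dict.empty) hpl hb ha
      (fun x hx => List.mem_range.mp hx) (fun z _ => rfl)
    obtain ⟨hglen, hgb, hga, hgrt, hgval⟩ := hgm
    have hgmA : pvGmLoopA evs colA p
        = (List.range evs.length).foldl (fun st i =>
            ((pvFindA st.1.length st.1 i).1,
             st.2.insert (pvFindA st.1.length st.1 i).2
               (max (st.2.getD (pvFindA st.1.length st.1 i).2 0) (colA.getD i 0))))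
          (p, PySem.Dict.empty) := rfl
    -- out loop
    have hout := pvOut_spec evs colA (pvGmLoopA evs colA p).2 (fun z => pvRoot p z)
      (L := List.range evs.length) (p := (pvGmLoopA evs colA p).1) (acc := [])
      (by rw [hgmA]; exact hglen) (by rw [hgmA]; exact hgb) (by rw [hgmA]; exact hga)
      (fun x hx => List.mem_range.mp hx)
      (by rw [hgmA]; exact hgrt)
    have houtA : (pvOutLoopA evs colA (pvGmLoopA evs colA p).2 (pvGmLoopA evs colA p).1).2
        = ((List.range evs.length).foldl
            (fun (st : List Nat × List (String × Int × Int)) i =>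
            ((pvFindA st.1.length st.1 i).1,
             st.2 ++ [(pvData evs i, colA.getD i 0,
               (pvGmLoopA evs colA p).2.getD (pvFindA st.1.length st.1 i).2 0 + 1)]))
          ((pvGmLoopA evs colA p).1, [])).2 := rfl
    rw [houtA, hout]
    -- best loop
    obtain ⟨hblen, hbval⟩ := pvBest_spec c (pvColsB evs).1 hcb (List.range evs.length)
      (List.replicate evs.length 0) (by simp) (fun x hx => List.mem_range.mp hx)
    have hbestB : pvBestLoopB evs.length c (pvColsB evs).1
        = (List.range evs.length).foldl (fun best j =>
            if (pvColsB evs).1.getD j 0 > best.getD (c.getD j 0) 0 then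
              best.set (c.getD j 0) ((pvColsB evs).1.getD j 0)
            else best) (List.replicate evs.length 0) := rfl
    rw [List.nil_append]
    apply List.map_congr_left
    intro i hiL
    have hi : i < evs.length := List.mem_range.mp hiL
    have hfilters : ∀ j ∈ List.range evs.length,
        ((fun j => pvRoot p j == pvRoot p i) j) = ((fun j => c.getD j 0 == c.getD i 0) j) := by
      intro j hjL
      have hj : j < evs.length := List.mem_range.mp hjL
      show (pvRoot p j == pvRoot p i) = (c.getD j 0 == c.getD i 0)
      by_cases hcij : c.getD j 0 = c.getD i 0
      · have hr : pvRoot p j = pvRoot p i := (hcr j i hj hi).mp hcij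
        rw [hr, hcij, beq_self_eq_true, beq_self_eq_true]
      · have hr : pvRoot p j ≠ pvRoot p i := fun hEq => hcij ((hcr j i hj hi).mpr hEq)
        rw [beq_eq_false_iff_ne.mpr hr, beq_eq_false_iff_ne.mpr hcij]
    have hthird : (pvGmLoopA evs colA p).2.getD (pvRoot p i) 0
        = (pvBestLoopB evs.length c (pvColsB evs).1).getD (c.getD i 0) 0 := by
      have hAv : (pvGmLoopA evs colA p).2.getD (pvRoot p i) 0
          = ((List.range evs.length).filter (fun j => pvRoot p j == pvRoot p i)).foldl
              (fun m j => max m (colA.getD j 0)) 0 := by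
        rw [hgmA, hgval (pvRoot p i)]
        rw [PySem.Dict.getD_empty]
      have hBv : (pvBestLoopB evs.length c (pvColsB evs).1).getD (c.getD i 0) 0
          = ((List.range evs.length).filter (fun j => c.getD j 0 == c.getD i 0)).foldl
              (fun m j => max m ((pvColsB evs).1.getD j 0)) 0 := by
        rw [hbestB, hbval (c.getD i 0), pvGetD_replicate]
      rw [hAv, hBv, hcolsBA, List.filter_congr hfilters]
    rw [hthird, hcolsBA]
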